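-- pv_equiv track=rewrite | github.com/Chelseacax/patient-ai-precheck-followup | voice_agent/confirmer.py | is_cancellation
-- ===== SOURCE A (Python) =====
-- _CANCEL_KEYWORDS = {
--     "no", "nope", "nah", "cancel", "stop", "wrong", "not right",
--     "change", "different", "another", "try again", "start over",
--     # Malay
--     "tidak", "tak", "salah", "batal",
--     # Mandarin romanised
--     "bu", "bu dui", "bu yao",
--     "n",
-- }
--
-- def is_cancellation(normalized_text: str) -> bool:
--     """Return True if the text expresses rejection/cancellation."""
--     text = normalized_text.lower().strip().rstrip(".")
--     if text in _CANCEL_KEYWORDS: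
--         return True
--     for kw in _CANCEL_KEYWORDS:
--         if text.startswith(kw + " ") or text.startswith(kw + ","):
--             return True
--     return False
-- ===== SOURCE B (Python) =====
-- _CANCEL_KEYWORDS = {
--     "no", "nope", "nah", "cancel", "stop", "wrong", "not right",
--     "change", "different", "another", "try again", "start over",
--     # Malay
--     "tidak", "tak", "salah", "batal",
--     # Mandarin romanised
--     "bu", "bu dui", "bu yao",
--     "n",
-- }
--
-- def is_cancellation(normalized_text: str) -> bool:
--     """Return True if the text expresses rejection/cancellation."""
--     text = normalized_text.lower().strip().rstrip(".")
--     if text in _CANCEL_KEYWORDS: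
--         return True
--     for i, ch in enumerate(text):
--         if (ch == ' ' or ch == ',') and text[:i] in _CANCEL_KEYWORDS:
--             return True
--     return False
-- ===== Notes on version B (the rewrite author's own statement) =====
-- stated objective: alternative
-- what changed: B inverts the traversal: instead of looping over the keyword set and testing two startswith variants per keyword, it scans the text's characters once and, at each space or comma, looks the preceding prefix up in the keyword set.
import Mathlib
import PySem

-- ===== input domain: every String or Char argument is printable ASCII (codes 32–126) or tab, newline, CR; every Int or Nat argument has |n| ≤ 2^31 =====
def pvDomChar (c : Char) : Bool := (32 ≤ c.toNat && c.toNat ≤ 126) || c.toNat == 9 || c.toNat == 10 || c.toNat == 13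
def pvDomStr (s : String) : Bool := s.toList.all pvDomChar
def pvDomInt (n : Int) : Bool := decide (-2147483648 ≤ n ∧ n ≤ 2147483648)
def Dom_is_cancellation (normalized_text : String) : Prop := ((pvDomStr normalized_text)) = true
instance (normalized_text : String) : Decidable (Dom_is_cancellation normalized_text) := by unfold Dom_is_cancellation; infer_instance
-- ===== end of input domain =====

-- B inverts the traversal: it scans the text once and looks each space/comma-bounded
-- prefix up in the keyword set, instead of looping over the keywords with startswith
-- (objective: alternative decomposition, same exact behaviour).

-- ===== PORT A =====
-- the module constant _CANCEL_KEYWORDS (a Python set of distinct string literals, insertion order)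
def cancelKeywords : List String :=
  ["no", "nope", "nah", "cancel", "stop", "wrong", "not right",
   "change", "different", "another", "try again", "start over",
   "tidak", "tak", "salah", "batal",
   "bu", "bu dui", "bu yao",
   "n"]

-- Python `s.rstrip(".")`, ported by hand: drop trailing '.' characters (exact for this one-char strip set)
def rstripDot (s : String) : String :=
  String.ofList ((s.toList.reverse.dropWhile (· == '.')).reverse)

-- the shared normalization line `normalized_text.lower().strip().rstrip(".")`
def normalizeText (s : String) : String :=
  rstripDot (PySem.Str.strip (PySem.Str.lower s))

def is_cancellation (normalized_text : String) : Bool :=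
  let text := normalizeText normalized_text
  if cancelKeywords.contains text then true
  else
    cancelKeywords.any (fun kw =>
      PySem.Str.startswith text (kw ++ " ") || PySem.Str.startswith text (kw ++ ","))

-- ===== PORT B =====
def is_cancellation_alt (normalized_text : String) : Bool :=
  let text := normalizeText normalized_text
  if cancelKeywords.contains text then true
  else
    (PySem.List.enumerate text.toList).any (fun p =>
      (p.2 == ' ' || p.2 == ',') &&
        cancelKeywords.contains (PySem.Str.slice text none (some p.1)))

-- ===== PRECONDITION & SPEC =====
def Spec_is_cancellation (normalized_text : String) (out : Bool) : Prop := out = is_cancellation_alt normalized_text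
instance (normalized_text : String) (out : Bool) : Decidable (Spec_is_cancellation normalized_text out) := by unfold Spec_is_cancellation; infer_instance

-- ===== CLAIM (what is proved, stated in full; the proofs are below) =====
def Claim_equal_is_cancellation : Prop := ∀ (normalized_text : String), Dom_is_cancellation normalized_text → Spec_is_cancellation normalized_text (is_cancellation normalized_text)

-- ===== LEMMAS AND PROOFS =====

-- `a ++ [c]` is a prefix of `t` iff position `a.length` of `t` holds `c` and the part before it is `a`
theorem prefix_snoc_iff (a t : List Char) (c : Char) :
    (a ++ [c]) <+: t ↔ a.length < t.length ∧ t[a.length]? = some c ∧ t.take a.length = a := by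
  constructor
  · intro h
    have hlen : a.length + 1 ≤ t.length := by simpa using h.length_le
    have hk : a.length < t.length := by omega
    have heq : a ++ [c] = t.take (a.length + 1) := by
      simpa using (List.prefix_iff_eq_take.mp h)
    rw [List.take_add_one, List.getElem?_eq_getElem hk] at heq
    have hlt : (t.take a.length).length = a.length := by
      rw [List.length_take]; omega
    obtain ⟨h1, h2⟩ := List.append_inj' heq (by simp)
    refine ⟨hk, ?_, h1.symm⟩
    rw [List.getElem?_eq_getElem hk]
    have h3 : t[a.length]'hk = c := by simpa using h2.symm
    rw [h3]
  · rintro ⟨hk, hget, htake⟩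
    have : t.take (a.length + 1) = a ++ [c] := by
      rw [List.take_add_one, hget, htake]; rfl
    rw [List.prefix_iff_eq_take]
    simpa using this.symm
-- `PySem.Str.slice t none (some k)` for a natural k is `take k` on the character list
theorem slice_to_natCast_str (t : String) (k : Nat) :
    PySem.Str.slice t none (some (k : Int)) = String.ofList (t.toList.take k) := by
  have h : (PySem.Str.slice t none (some (k : Int))).toList = t.toList.take k := by
    simp [PySem.Str.toList_slice, PySem.List.slice_to_natCast]
  apply String.toList_injective
  rw [h, String.toList_ofList]

-- the common characterisation: some keyword is followed by a space/comma at the front of `t`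
def hitAt (t : String) : Prop :=
  ∃ k, ∃ _ : k < t.toList.length,
    (t.toList[k]'(by omega) = ' ' ∨ t.toList[k]'(by omega) = ',') ∧
      String.ofList (t.toList.take k) ∈ cancelKeywords

theorem a_any_iff (t : String) :
    (cancelKeywords.any (fun kw =>
      PySem.Str.startswith t (kw ++ " ") || PySem.Str.startswith t (kw ++ ","))) = true ↔ hitAt t := by
  rw [List.any_eq_true]
  constructor
  · rintro ⟨kw, hkw, hp⟩
    rw [Bool.or_eq_true, PySem.Str.startswith_eq, PySem.Str.startswith_eq,
      PySem.Chars.startswith_iff, PySem.Chars.startswith_iff] at hp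
    have hp' : (kw.toList ++ [' ']) <+: t.toList ∨ (kw.toList ++ [',']) <+: t.toList := by
      simpa [String.toList_append] using hp
    rcases hp' with h | h <;>
    · obtain ⟨hk, hget, htake⟩ := (prefix_snoc_iff _ _ _).mp h
      refine ⟨kw.toList.length, hk, ?_, ?_⟩
      · rw [List.getElem?_eq_getElem hk] at hget
        simp at hget
        simp [hget]
      · rw [htake]
        simpa using hkw
  · rintro ⟨k, hk, hdelim, hmem⟩
    refine ⟨String.ofList (t.toList.take k), hmem, ?_⟩
    rw [Bool.or_eq_true, PySem.Str.startswith_eq, PySem.Str.startswith_eq,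
      PySem.Chars.startswith_iff, PySem.Chars.startswith_iff]
    have hlen : (t.toList.take k).length = k := by rw [List.length_take]; omega
    have hpre : ∀ c, t.toList[k]'(by omega) = c →
        ((t.toList.take k) ++ [c]) <+: t.toList := by
      intro c hc
      apply (prefix_snoc_iff _ _ _).mpr
      refine ⟨by omega, ?_, by rw [hlen]⟩
      rw [hlen, List.getElem?_eq_getElem hk, hc]
    rcases hdelim with hc | hc
    · left; simpa [String.toList_append, hlen] using hpre _ hc
    · right; simpa [String.toList_append, hlen] using hpre _ hc

theorem b_any_iff (t : String) :
    ((PySem.List.enumerate t.toList).any (fun p =>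
      (p.2 == ' ' || p.2 == ',') &&
        cancelKeywords.contains (PySem.Str.slice t none (some p.1)))) = true ↔ hitAt t := by
  rw [List.any_eq_true]
  constructor
  · rintro ⟨p, hpmem, hp⟩
    obtain ⟨k, hk, rfl⟩ := (PySem.List.mem_enumerate_iff _ _ _).mp hpmem
    simp only [zero_add] at hp ⊢
    rw [Bool.and_eq_true, Bool.or_eq_true, beq_iff_eq, beq_iff_eq] at hp
    obtain ⟨hdelim, hmem⟩ := hp
    rw [slice_to_natCast_str, List.contains_iff_mem] at hmem
    exact ⟨k, hk, hdelim, hmem⟩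
  · rintro ⟨k, hk, hdelim, hmem⟩
    refine ⟨((k : Int), t.toList[k]'(by omega)), ?_, ?_⟩
    · exact (PySem.List.mem_enumerate_iff _ _ _).mpr ⟨k, hk, by simp⟩
    · rw [Bool.and_eq_true, Bool.or_eq_true, beq_iff_eq, beq_iff_eq]
      refine ⟨hdelim, ?_⟩
      rw [slice_to_natCast_str, List.contains_iff_mem]
      exact hmem

-- ===== VERDICT (by name: the statement is the Claim_ definition above) =====
theorem is_cancellation_spec : Claim_equal_is_cancellation := by
  intro s _
  unfold Spec_is_cancellation is_cancellation is_cancellation_alt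
  set t := normalizeText s with ht
  by_cases hmem : cancelKeywords.contains t
  · have hm := List.contains_iff_mem.mp hmem
    simp [hm]
  · simp only [hmem, Bool.false_eq_true, if_false]
    rcases hA : (cancelKeywords.any (fun kw =>
        PySem.Str.startswith t (kw ++ " ") || PySem.Str.startswith t (kw ++ ","))) with _ | _
    · rcases hB : ((PySem.List.enumerate t.toList).any (fun p =>
          (p.2 == ' ' || p.2 == ',') &&
            cancelKeywords.contains (PySem.Str.slice t none (some p.1)))) with _ | _
      · rfl
      · have h := (a_any_iff t).mpr ((b_any_iff t).mp hB)
        rw [hA] at h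
        exact h
    · exact ((b_any_iff t).mpr ((a_any_iff t).mp hA)).symm
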